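-- pv_equiv track=rewrite | github.com/qqzmr/pynumbertheory | logrange.py | get_log_range
-- ===== SOURCE A (Python) =====
-- def get_log_range(num, basenum):
--     """
--         求对数范围。
--
--         Args:
--             num: 数，大于等于1并且是整数。
--             basenum: 底数，大于等于2并且是整数。
--
--         Returns:
--             返回结果。对数范围。
--
--         Raises:
--             IOError: 无错误。
--     """
--     if num == 1:
--         return 0, 0
--     else:
--         n = 0
--         ism = 0
--         while num >= basenum:
--             if ism == 0 and num % basenum != 0:
--                 ism = 1
--             n += 1
--             num //= basenum
--         return n, n + ism
-- ===== SOURCE B (Python) =====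
-- def get_log_range(num, basenum):
--     if num == 1:
--         return 0, 0
--     p = 1
--     n = 0
--     while p * basenum <= num:
--         p *= basenum
--         n += 1
--     return n, n + (0 if num % p == 0 else 1)
-- ===== Notes on version B (the rewrite author's own statement) =====
-- stated objective: alternative
-- what changed: B iterates upward on powers (p *= basenum) instead of repeatedly floor-dividing num down, and replaces A's per-step remainder flag by one divisibility test num % basenum**n == 0 after the loop.
-- outside the precondition, e.g. on get_log_range(5, -1): A returns (1, 1), B does not finish within the time limit; on get_log_range(0, 0): A raises ZeroDivisionError, B does not finish within the time limit; on get_log_range(4, 0): A raises ZeroDivisionError, B does not finish within the time limit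
import Mathlib
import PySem

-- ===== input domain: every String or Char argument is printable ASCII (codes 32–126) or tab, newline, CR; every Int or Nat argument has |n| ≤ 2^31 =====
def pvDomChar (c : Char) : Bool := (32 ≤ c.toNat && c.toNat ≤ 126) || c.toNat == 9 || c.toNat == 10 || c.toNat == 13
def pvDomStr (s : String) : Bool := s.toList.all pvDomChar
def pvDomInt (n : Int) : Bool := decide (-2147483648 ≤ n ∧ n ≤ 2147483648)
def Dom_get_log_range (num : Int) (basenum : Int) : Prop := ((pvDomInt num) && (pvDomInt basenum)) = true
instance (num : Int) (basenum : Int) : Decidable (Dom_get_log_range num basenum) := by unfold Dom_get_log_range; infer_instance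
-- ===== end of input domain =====

-- B re-implements A by iterating upward on powers (p *= basenum) instead of floor-dividing num
-- down, replacing A's per-step remainder flag by one final divisibility test (alternative; same cost).
-- ===== PORT A =====
-- A's while-loop; the '2 ≤ basenum' half of the guard only makes the recursion total
-- (it holds on all of Pre_; for basenum ≤ 1 Python A diverges or raises whenever the loop is entered).
def pvLoopA (basenum num n ism : Int) : Int × Int :=
  if h : 2 ≤ basenum ∧ basenum ≤ num then
    pvLoopA basenum (PySem.Int.floordiv num basenum) (n + 1)
      (if ism = 0 ∧ PySem.Int.mod num basenum ≠ 0 then 1 else ism)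
  else (n, n + ism)
termination_by num.toNat
decreasing_by
  have hd : PySem.Int.floordiv num basenum = num / basenum :=
    PySem.Int.floordiv_eq_ediv_of_pos (by omega)
  have h2 : num / basenum < num := Int.ediv_lt_of_lt_mul (by omega) (by nlinarith)
  have h3 : 0 ≤ num / basenum := Int.ediv_nonneg (by omega) (by omega)
  rw [hd]; omega

def get_log_range (num : Int) (basenum : Int) : Int × Int :=
  if num = 1 then (0, 0) else pvLoopA basenum num 0 0

-- ===== PORT B =====
-- B's while-loop; the '2 ≤ basenum ∧ 1 ≤ p' part of the guard only makes the recursion total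
-- (on Pre_ it always holds; for basenum ≤ 1 Python B's loop diverges whenever it is entered).
def pvLoopB (basenum num p n : Int) : Int × Int :=
  if h : 2 ≤ basenum ∧ 1 ≤ p ∧ p * basenum ≤ num then
    pvLoopB basenum num (p * basenum) (n + 1)
  else (p, n)
termination_by (num + 1 - p).toNat
decreasing_by
  have h2 : p * 2 ≤ p * basenum := by
    apply mul_le_mul_of_nonneg_left (by omega) (by omega)
  omega

def get_log_range_alt (num : Int) (basenum : Int) : Int × Int :=
  if num = 1 then (0, 0)
  else
    let pn := pvLoopB basenum num 1 0
    (pn.2, pn.2 + (if PySem.Int.mod num pn.1 = 0 then 0 else 1))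

-- ===== PRECONDITION & SPEC =====
-- Pre_ excludes degenerate bases basenum ≤ 1 whose loop is entered (basenum ≤ num), on which A
-- diverges (basenum = 1, num ≥ 2), raises ZeroDivisionError (basenum = 0, num ≥ 0, num ≠ 1) or
-- returns accidental values of signed floor-division (negative basenum), and B's loop may diverge.
-- (num = 1 and num < basenum are kept: the loop body never runs, both return (0, 0).)
def Pre_get_log_range (num : Int) (basenum : Int) : Prop := 2 ≤ basenum ∨ num < basenum ∨ num = 1
instance (num : Int) (basenum : Int) : Decidable (Pre_get_log_range num basenum) := by
  unfold Pre_get_log_range; infer_instance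
def pvWitness_get_log_range : Int × Int := (50, 5)

def Spec_get_log_range (num : Int) (basenum : Int) (out : Int × Int) : Prop := out = get_log_range_alt num basenum
instance (num : Int) (basenum : Int) (out : Int × Int) : Decidable (Spec_get_log_range num basenum out) := by unfold Spec_get_log_range; infer_instance

-- ===== CLAIM (what is proved, stated in full; the proofs are below) =====
def Claim_equal_get_log_range : Prop := ∀ (num : Int) (basenum : Int), Dom_get_log_range num basenum → Pre_get_log_range num basenum → Spec_get_log_range num basenum (get_log_range num basenum)

-- ===== LEMMAS AND PROOFS =====

-- A's loop computes L = ⌊log_basenum num⌋ and a flag that is 0 iff basenum^L divides num.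
theorem pvLoopA_closed (b : Int) (hb : 2 ≤ b) :
    ∀ (L : ℕ) (num n ism : Int), 1 ≤ num → Nat.log b.toNat num.toNat = L →
      pvLoopA b num n ism =
        (n + L, n + L + (if ism = 0 then (if b ^ L ∣ num then 0 else 1) else ism)) := by
  intro L
  induction L with
  | zero =>
    intro num n ism h1 hlog
    have hlt : num < b := by
      rcases Nat.log_eq_zero_iff.mp hlog with h | h
      · omega
      · omega
    rw [pvLoopA, dif_neg (by omega)]
    simp only [pow_zero, one_dvd, if_true, Nat.cast_zero, add_zero, Prod.mk.injEq]
    refine ⟨by trivial, ?_⟩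
    split <;> omega
  | succ L ih =>
    intro num n ism h1 hlog
    have hble : b ≤ num := by
      by_contra hc
      have : Nat.log b.toNat num.toNat = 0 := Nat.log_eq_zero_iff.mpr (by left; omega)
      omega
    have hbne : b ≠ 0 := by omega
    have hd : PySem.Int.floordiv num b = num / b := PySem.Int.floordiv_eq_ediv_of_pos (by omega)
    have h1' : 1 ≤ num / b := Int.le_ediv_iff_mul_le (by omega) |>.mpr (by omega)
    have htn : (num / b).toNat = num.toNat / b.toNat := by
      conv_lhs => rw [show num = (num.toNat : Int) by omega, show b = (b.toNat : Int) by omega]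
      rw [← Int.natCast_div, Int.toNat_natCast]
    have hlog' : Nat.log b.toNat (num / b).toNat = L := by
      rw [htn, Nat.log_div_base, hlog]
      omega
    rw [pvLoopA, dif_pos ⟨hb, hble⟩, hd, ih (num / b) (n + 1) _ h1' hlog']
    have hdvd_iff : b ∣ num → ((b ^ (L + 1) ∣ num) ↔ (b ^ L ∣ num / b)) := by
      rintro ⟨m, rfl⟩
      rw [Int.mul_ediv_cancel_left m hbne, pow_succ, mul_comm (b ^ L) b,
        mul_dvd_mul_iff_left hbne]
    have hndvd : ¬ b ∣ num → ¬ b ^ (L + 1) ∣ num := by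
      intro h hc
      exact h (dvd_trans (dvd_pow_self b (Nat.succ_ne_zero L)) hc)
    by_cases hism : ism = 0
    · by_cases hdvd : b ∣ num
      · have hm : PySem.Int.mod num b = 0 := (PySem.Int.mod_eq_zero_iff_dvd num b).mpr hdvd
        simp only [hism, hm, ne_eq, not_true_eq_false, and_false, if_false, if_true,
          hdvd_iff hdvd, Prod.mk.injEq]
        constructor <;> (push_cast; ring)
      · have hm : PySem.Int.mod num b ≠ 0 := fun hc =>
          hdvd ((PySem.Int.mod_eq_zero_iff_dvd num b).mp hc)
        simp only [hism, hm, ne_eq, not_false_eq_true, and_true, if_true,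
          if_neg (hndvd hdvd), one_ne_zero, if_false, Prod.mk.injEq]
        constructor <;> (push_cast; ring)
    · simp only [hism, false_and, if_false, Prod.mk.injEq]
      constructor <;> (push_cast; ring)

-- B's loop climbs the powers basenum^j up to the same L.
theorem pvLoopB_closed (b num : Int) (hb : 2 ≤ b) (h1 : 1 ≤ num) :
    ∀ (k j : ℕ), j + k = Nat.log b.toNat num.toNat →
      pvLoopB b num (b ^ j) (j : Int) =
        (b ^ Nat.log b.toNat num.toNat, (Nat.log b.toNat num.toNat : Int)) := by
  have hB : 1 < b.toNat := by omega
  have hN : num.toNat ≠ 0 := by omega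
  have hcast : ∀ (m : ℕ), (b ^ m ≤ num) ↔ (b.toNat ^ m ≤ num.toNat) := by
    intro m
    rw [show num = (num.toNat : Int) by omega, show b = (b.toNat : Int) by omega]
    constructor <;> intro h <;> exact_mod_cast h
  intro k
  induction k with
  | zero =>
    intro j hj
    have hjL : j = Nat.log b.toNat num.toNat := by omega
    subst hjL
    have hgt : ¬ (b ^ Nat.log b.toNat num.toNat * b ≤ num) := by
      rw [show b ^ Nat.log b.toNat num.toNat * b = b ^ (Nat.log b.toNat num.toNat + 1) by ring,
        hcast]
      have h2 := Nat.lt_pow_succ_log_self hB num.toNat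
      simp only [Nat.succ_eq_add_one] at h2
      omega
    rw [pvLoopB, dif_neg (by tauto)]
  | succ k ih =>
    intro j hj
    have hle : b ^ j * b ≤ num := by
      rw [show b ^ j * b = b ^ (j + 1) by ring, hcast]
      exact Nat.pow_le_of_le_log hN (by omega)
    have hp : 1 ≤ b ^ j := one_le_pow₀ (by omega)
    rw [pvLoopB, dif_pos ⟨hb, hp, hle⟩,
      show b ^ j * b = b ^ (j + 1) by ring,
      show ((j : Int) + 1) = ((j + 1 : ℕ) : Int) by push_cast; ring]
    exact ih (j + 1) (by omega)

-- ===== VERDICT (by name: the statement is the Claim_ definition above) =====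
theorem get_log_range_spec : Claim_equal_get_log_range := by
  intro num b _ hpre
  unfold Pre_get_log_range at hpre
  unfold Spec_get_log_range get_log_range get_log_range_alt
  by_cases h1 : num = 1
  · simp [h1]
  simp only [if_neg h1]
  by_cases hb : 2 ≤ b
  · by_cases hpos : 1 ≤ num
    · have hA := pvLoopA_closed b hb (Nat.log b.toNat num.toNat) num 0 0 hpos rfl
      have hBc := pvLoopB_closed b num hb hpos (Nat.log b.toNat num.toNat) 0 (by omega)
      simp only [pow_zero, Nat.cast_zero] at hBc
      rw [hA]
      simp only [hBc, PySem.Int.mod_eq_zero_iff_dvd, if_true, zero_add]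
    · rw [pvLoopA, dif_neg (by omega), pvLoopB, dif_neg (by rintro ⟨-, -, h3⟩; omega)]
      simp
  · -- loop never entered: num < basenum (and basenum ≤ 1), both loops exit at once
    have hlt : num < b := by
      rcases hpre with h | h | h
      · omega
      · exact h
      · omega
    rw [pvLoopA, dif_neg (by omega), pvLoopB, dif_neg (by rintro ⟨-, -, h3⟩; omega)]
    simp
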